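-- pv_equiv track=rewrite | github.com/darkcofy/sqlprism | src/sqlprism/core/conventions.py | _find_common_prefix_tokens
-- ===== SOURCE A (Python) =====
-- from collections import Counter
--
-- def _find_common_prefix_tokens(
--     tokenized: list[list[str]],
-- ) -> list[str]:
--     """Find prefix tokens shared by >=70% of names."""
--     if not tokenized:
--         return []
--
--     total = len(tokenized)
--     threshold = 0.7
--
--     # Check first token frequency
--     first_tokens = Counter(
--         tokens[0] for tokens in tokenized if tokens
--     )
--     if not first_tokens:
--         return []
--
--     most_common_token, count = first_tokens.most_common(1)[0]
--     if count / total >= threshold: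
--         return [most_common_token]
--
--     return []
-- ===== SOURCE B (Python) =====
-- def _find_common_prefix_tokens(
--     tokenized: list[list[str]],
-- ) -> list[str]:
--     """Find prefix tokens shared by >=70% of names (Boyer-Moore majority vote)."""
--     if not tokenized:
--         return []
--
--     total = len(tokenized)
--
--     # One-pass majority vote over the first tokens.
--     candidate = None
--     count = 0
--     for tokens in tokenized:
--         if not tokens:
--             continue
--         t = tokens[0]
--         if count == 0:
--             candidate = t
--             count = 1
--         elif t == candidate:
--             count += 1
--         else:
--             count -= 1
--
--     if candidate is None:
--         return []
--
--     # Verify: a token covering >=70% of all names is a strict majority of the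
--     # first tokens, so the vote's candidate is the only possible winner.
--     actual = sum(1 for tokens in tokenized if tokens and tokens[0] == candidate)
--     if actual / total >= 0.7:
--         return [candidate]
--     return []
-- ===== Notes on version B (the rewrite author's own statement) =====
-- stated objective: alternative
-- what changed: Replaces the Counter histogram and most_common(1) selection with a single-candidate Boyer-Moore majority vote over the first tokens plus one verification pass; the >=70% threshold guarantees any qualifying token is a strict majority, so the vote is exact.
import Mathlib
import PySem

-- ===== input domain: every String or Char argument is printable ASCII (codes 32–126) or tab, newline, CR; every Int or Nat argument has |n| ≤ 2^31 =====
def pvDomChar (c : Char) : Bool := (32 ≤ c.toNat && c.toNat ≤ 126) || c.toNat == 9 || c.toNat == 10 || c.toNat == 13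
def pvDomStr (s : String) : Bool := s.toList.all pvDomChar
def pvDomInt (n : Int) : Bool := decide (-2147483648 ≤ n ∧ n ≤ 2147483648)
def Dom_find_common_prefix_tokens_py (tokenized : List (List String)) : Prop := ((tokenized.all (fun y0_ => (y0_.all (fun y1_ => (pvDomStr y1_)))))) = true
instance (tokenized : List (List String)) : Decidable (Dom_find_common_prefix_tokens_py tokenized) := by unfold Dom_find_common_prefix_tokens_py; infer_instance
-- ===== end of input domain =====

-- B replaces A's Counter histogram + most_common(1) by a Boyer–Moore majority vote over the
-- first tokens (the ≥70% threshold forces a strict majority, so the vote is exact); same cost.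

-- ===== PORT A =====
-- Counter(tokens[0] for tokens in tokenized if tokens); most_common(1)[0] is the first
-- maximal-count item in insertion order = PySem.List.max? over the dict items.
-- `count / total >= 0.7` is ported as the integer comparison 7*total ≤ 10*count, which is
-- exact for the float division at these magnitudes.
def find_common_prefix_tokens_py (tokenized : List (List String)) : List String :=
  if tokenized = [] then []
  else
    let total : Int := tokenized.length
    let first_tokens : PySem.Dict String Int :=
      PySem.Dict.counter (tokenized.filterMap (fun tokens => tokens.head?))
    if first_tokens.items = [] then []
    else
      match PySem.List.max? first_tokens.items (fun kv => kv.2) with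
      | none => []
      | some (most_common_token, count) =>
          if 7 * total ≤ 10 * count then [most_common_token] else []

-- ===== PORT B =====
-- one voting step of Source B's loop body (skips empty sublists)
def pvVoteStep (st : Option String × Int) (tokens : List String) : Option String × Int :=
  match tokens with
  | [] => st
  | t :: _ =>
      if st.2 = 0 then (some t, 1)
      else if some t = st.1 then (st.1, st.2 + 1)
      else (st.1, st.2 - 1)

-- same float-comparison port as in A: `actual / total >= 0.7` ↦ 7*total ≤ 10*actual
def find_common_prefix_tokens_py_alt (tokenized : List (List String)) : List String :=
  if tokenized = [] then []
  else
    let total : Int := tokenized.length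
    let st := tokenized.foldl pvVoteStep (none, 0)
    match st.1 with
    | none => []
    | some candidate =>
        let actual : Int := tokenized.countP (fun tokens => tokens.head? == some candidate)
        if 7 * total ≤ 10 * actual then [candidate] else []

-- ===== PRECONDITION & SPEC =====
def Spec_find_common_prefix_tokens_py (tokenized : List (List String)) (out : List String) : Prop := out = find_common_prefix_tokens_py_alt tokenized
instance (tokenized : List (List String)) (out : List String) : Decidable (Spec_find_common_prefix_tokens_py tokenized out) := by unfold Spec_find_common_prefix_tokens_py; infer_instance

-- ===== CLAIM (what is proved, stated in full; the proofs are below) =====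
def Claim_equal_find_common_prefix_tokens_py : Prop := ∀ (tokenized : List (List String)), Dom_find_common_prefix_tokens_py tokenized → Spec_find_common_prefix_tokens_py tokenized (find_common_prefix_tokens_py tokenized)

-- ===== LEMMAS AND PROOFS =====

-- the same vote step, on a bare first token
def pvStep (st : Option String × Int) (t : String) : Option String × Int :=
  if st.2 = 0 then (some t, 1)
  else if some t = st.1 then (st.1, st.2 + 1)
  else (st.1, st.2 - 1)

theorem pvFold_eq_firsts (L : List (List String)) (st : Option String × Int) :
    L.foldl pvVoteStep st = (L.filterMap List.head?).foldl pvStep st := by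
  induction L generalizing st with
  | nil => rfl
  | cons hd tl ih =>
      cases hd with
      | nil => simpa [pvVoteStep] using ih st
      | cons t r => simpa [pvVoteStep, pvStep] using ih (pvStep st t)

theorem pvCountP_eq_count (L : List (List String)) (c : String) :
    L.countP (fun tokens => tokens.head? == some c) = (L.filterMap List.head?).count c := by
  induction L with
  | nil => rfl
  | cons hd tl ih =>
      cases hd with
      | nil => simpa [List.countP_cons] using ih
      | cons t r =>
          by_cases h : t = c <;>
            simp [h, ih, beq_iff_eq]

-- the potential of Boyer–Moore voting relative to a fixed token x
def pvPhi (x : String) (st : Option String × Int) : Int :=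
  if st.1 = some x then st.2 else -st.2

theorem pvStep_phi (x : String) (st : Option String × Int) (t : String) (h : 0 ≤ st.2) :
    pvPhi x st + (if t = x then 1 else -1) ≤ pvPhi x (pvStep st t) ∧ 0 ≤ (pvStep st t).2 := by
  obtain ⟨c, k⟩ := st
  unfold pvStep pvPhi at *
  by_cases hk : k = 0 <;> by_cases htc : some t = c <;> by_cases hcx : c = some x <;>
    by_cases htx : t = x <;>
      simp_all <;> omega

theorem pvFold_phi (L : List String) (st : Option String × Int) (x : String) (h : 0 ≤ st.2) :
    pvPhi x st + 2 * (L.count x : Int) - L.length ≤ pvPhi x (L.foldl pvStep st) ∧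
      0 ≤ (L.foldl pvStep st).2 := by
  induction L generalizing st with
  | nil => simpa using h
  | cons t tl ih =>
      obtain ⟨h1, h2⟩ := pvStep_phi x st t h
      obtain ⟨h3, h4⟩ := ih (pvStep st t) h2
      refine ⟨?_, by simpa using h4⟩
      simp only [List.foldl_cons, List.count_cons, List.length_cons]
      by_cases htx : t = x
      · rw [if_pos htx] at h1
        rw [if_pos (by simp [htx])]
        push_cast
        omega
      · rw [if_neg htx] at h1
        rw [if_neg (by simp [htx])]
        push_cast
        omega

theorem pvMajority (L : List String) (x : String)
    (h : (L.length : Int) < 2 * (L.count x : Int)) :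
    (L.foldl pvStep (none, 0)).1 = some x := by
  obtain ⟨h1, h2⟩ := pvFold_phi L (none, 0) x (by norm_num)
  have h0 : pvPhi x (none, 0) = 0 := by simp [pvPhi]
  rw [h0] at h1
  by_cases hc : (L.foldl pvStep (none, 0)).1 = some x
  · exact hc
  · exfalso
    unfold pvPhi at h1
    rw [if_neg hc] at h1
    omega

theorem pvCandidate_mem (L : List String) (st : Option String × Int) (c : String)
    (h : (L.foldl pvStep st).1 = some c) : st.1 = some c ∨ c ∈ L := by
  induction L generalizing st with
  | nil => exact Or.inl h
  | cons t tl ih =>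
      rcases ih (pvStep st t) (by simpa using h) with hh | hh
      · unfold pvStep at hh
        split_ifs at hh with h1 h2
        · simp at hh; simp [hh]
        · exact Or.inl hh
        · exact Or.inl hh
      · exact Or.inr (List.mem_cons_of_mem _ hh)

-- ===== VERDICT (by name: the statement is the Claim_ definition above) =====
theorem find_common_prefix_tokens_py_spec : Claim_equal_find_common_prefix_tokens_py := by
  intro tokenized _
  unfold Spec_find_common_prefix_tokens_py
  by_cases hE : tokenized = []
  · simp [find_common_prefix_tokens_py, find_common_prefix_tokens_py_alt, hE]
  set firsts := tokenized.filterMap List.head? with hfirsts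
  by_cases hF : firsts = []
  · have hitems : (PySem.Dict.counter firsts).items = [] := by
      rw [PySem.Dict.items_counter]; simp [hF, PySem.Set.ofList]
    have hfold : tokenized.foldl pvVoteStep (none, 0) = (none, 0) := by
      rw [pvFold_eq_firsts, ← hfirsts, hF]; rfl
    simp [find_common_prefix_tokens_py, find_common_prefix_tokens_py_alt, hE, ← hfirsts,
      hitems, hfold]
  -- firsts nonempty: the Counter has items and a first maximal one
  have hitems : (PySem.Dict.counter firsts).items
      = (PySem.Set.ofList firsts).map (fun k => (k, (firsts.count k : Int))) :=
    PySem.Dict.items_counter firsts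
  have hitems_ne : (PySem.Dict.counter firsts).items ≠ [] := by
    rw [hitems]
    obtain ⟨a, ha⟩ := List.exists_mem_of_ne_nil firsts hF
    have : a ∈ PySem.Set.ofList firsts := (PySem.Set.mem_ofList _ _).2 ha
    intro hcon
    rcases List.map_eq_nil_iff.1 hcon with h0
    simp [h0] at this
  obtain ⟨mc, hmc⟩ : ∃ p, PySem.List.max? (PySem.Dict.counter firsts).items (fun kv => kv.2) = some p := by
    cases hmx : PySem.List.max? (PySem.Dict.counter firsts).items (fun kv => kv.2) with
    | none => exact absurd ((PySem.List.max?_eq_none_iff _ _).1 hmx) hitems_ne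
    | some p => exact ⟨p, rfl⟩
  obtain ⟨m, cnt⟩ := mc
  have hmem := PySem.List.max?_mem hmc
  rw [hitems] at hmem
  obtain ⟨k, hkmem, hkeq⟩ := List.mem_map.1 hmem
  injection hkeq with hk1 hk2
  subst hk1
  subst hk2
  have hmfirsts : k ∈ firsts := (PySem.Set.mem_ofList _ _).1 hkmem
  have hmax : ∀ y ∈ firsts, (firsts.count y : Int) ≤ (firsts.count k : Int) := by
    intro y hy
    have hy' : (y, (firsts.count y : Int)) ∈ (PySem.Dict.counter firsts).items := by
      rw [hitems]
      exact List.mem_map.2 ⟨y, (PySem.Set.mem_ofList _ _).2 hy, rfl⟩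
    exact PySem.List.max?_isMax hmc _ hy'
  have hlen : firsts.length ≤ tokenized.length := List.length_filterMap_le _ _
  have htotpos : 0 < tokenized.length := List.length_pos_of_ne_nil hE
  have hnpos : 0 < firsts.length := List.length_pos_of_ne_nil hF
  have hcountle : firsts.count k ≤ firsts.length := List.count_le_length
  -- unfold both programs
  rw [find_common_prefix_tokens_py, find_common_prefix_tokens_py_alt]
  simp only [hE, if_false, ← hfirsts, hmc, hitems_ne]
  by_cases hT : 7 * (tokenized.length : Int) ≤ 10 * (firsts.count k : Int)
  · -- A returns [m]; m is a strict majority of firsts, so B's vote elects m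
    have hmaj : (firsts.length : Int) < 2 * (firsts.count k : Int) := by
      have h1 : (firsts.length : Int) ≤ (tokenized.length : Int) := by exact_mod_cast hlen
      have h2 : (0 : Int) < firsts.length := by exact_mod_cast hnpos
      omega
    have hcand : (tokenized.foldl pvVoteStep (none, 0)).1 = some k := by
      rw [pvFold_eq_firsts, ← hfirsts]; exact pvMajority firsts k hmaj
    have hact : ((tokenized.countP (fun tokens => tokens.head? == some k) : Nat) : Int)
        = (firsts.count k : Int) := by
      rw [pvCountP_eq_count, ← hfirsts]
    rw [if_pos hT, hcand]
    simp only [hact, if_pos hT]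
  · -- A returns []; no first token reaches the threshold, so B returns [] too
    rw [if_neg hT]
    cases hcand : (tokenized.foldl pvVoteStep (none, 0)).1 with
    | none => rfl
    | some c =>
        have hcmem : c ∈ firsts := by
          rw [pvFold_eq_firsts, ← hfirsts] at hcand
          rcases pvCandidate_mem firsts (none, 0) c hcand with h | h
          · simp at h
          · exact h
        have hle : (firsts.count c : Int) ≤ (firsts.count k : Int) := hmax c hcmem
        have hact : ((tokenized.countP (fun tokens => tokens.head? == some c) : Nat) : Int)
            = (firsts.count c : Int) := by rw [pvCountP_eq_count, ← hfirsts]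
        simp only [hact]
        rw [if_neg (by omega)]
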